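-- pv_equiv track=rewrite | github.com/pypi-data/pypi-mirror-68 | packages/thermosteam/thermosteam-0.17.2.tar.gz/thermosteam-0.17.2/thermosteam/properties/elements.py | atoms_to_Hill
-- ===== SOURCE A (Python) =====
-- def atoms_to_Hill(atoms):
--     r'''
--     Determine the Hill formula of a compound as in [4]_, given a dictionary of its
--     atoms and their counts, in the format {symbol: count}.
--
--     Parameters
--     ----------
--     atoms : dict
--         dictionary of counts of individual atoms, indexed by symbol with
--         proper capitalization, [-]
--
--     Returns
--     -------
--     Hill_formula : str
--         Hill formula, [-]
--
--     Notes
--     -----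
--     The Hill system is as follows:
--
--     If the chemical has 'C' in it, this is listed first, and then if it has
--     'H' in it as well as 'C', then that goes next. All elements are sorted
--     alphabetically afterwards, including 'H' if 'C' is not present.
--     All elements are followed by their count, unless it is 1.
--
--     Examples
--     --------
--     >>> atoms_to_Hill({'H': 5, 'C': 2, 'Br': 1})
--     'C2H5Br'
--
--     '''
--     def str_ele_count(ele):
--         if atoms[ele] == 1:
--             count = ''
--         else:
--             count = str(atoms[ele])
--         return count
--     atoms = atoms.copy()
--     s = ''
--     if 'C' in atoms.keys():
--         s += 'C' + str_ele_count('C')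
--         del atoms['C']
--         if 'H' in atoms.keys():
--             s += 'H' + str_ele_count('H')
--             del atoms['H']
--         for ele in sorted(atoms.keys()):
--             s += ele + str_ele_count(ele)
--     else:
--         for ele in sorted(atoms.keys()):
--             s += ele + str_ele_count(ele)
--     return s
-- ===== SOURCE B (Python) =====
-- def atoms_to_Hill(atoms):
--     has_C = 'C' in atoms
--     def key(e):
--         if e == 'C':
--             return (0, '')
--         if e == 'H' and has_C:
--             return (1, '')
--         return (2, e)
--     return ''.join(e + ('' if atoms[e] == 1 else str(atoms[e]))
--                    for e in sorted(atoms, key=key))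
-- ===== Notes on version B (the rewrite author's own statement) =====
-- stated objective: simpler
-- what changed: Replaces the C/H special-case branching, the dict copy with dels and the two duplicated loops by a single keyed sort (rank C first, then H when C is present, then alphabetical) plus one join pass.
import Mathlib
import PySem

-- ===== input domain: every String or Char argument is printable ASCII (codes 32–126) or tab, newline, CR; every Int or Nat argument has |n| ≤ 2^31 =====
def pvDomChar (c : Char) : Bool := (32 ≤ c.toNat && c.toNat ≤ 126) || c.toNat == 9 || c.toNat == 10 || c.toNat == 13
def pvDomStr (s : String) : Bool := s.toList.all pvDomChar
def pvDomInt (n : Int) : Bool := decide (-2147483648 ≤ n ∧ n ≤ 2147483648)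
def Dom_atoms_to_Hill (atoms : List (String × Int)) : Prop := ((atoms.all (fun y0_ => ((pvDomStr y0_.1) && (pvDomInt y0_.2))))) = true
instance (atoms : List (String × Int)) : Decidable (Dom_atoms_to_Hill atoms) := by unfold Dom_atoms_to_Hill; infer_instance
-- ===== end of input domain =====

-- B replaces A's C/H special-case branches, dict copy/dels and duplicated loops by one
-- keyed sort plus a single join pass (objective: simpler); same return value everywhere.

-- ===== PORT A =====
-- str_ele_count(ele) of A, reading the dict as it stands at call time (ele is always a present key)
def hillCntA (d : PySem.Dict String Int) (ele : String) : String :=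
  if d.getD ele 0 = 1 then "" else PySem.Int.toStr (d.getD ele 0)

-- "for ele in sorted(atoms.keys()): s += ele + str_ele_count(ele)"
def hillLoopA (d : PySem.Dict String Int) (s : String) : String :=
  (PySem.List.sorted d.keys (fun x => x)).foldl (fun s ele => s ++ (ele ++ hillCntA d ele)) s

def atoms_to_Hill (atoms : List (String × Int)) : String :=
  let d0 := PySem.Dict.ofList atoms          -- the dict argument; A mutates only its copy
  if d0.contains "C" then
    let s := "" ++ ("C" ++ hillCntA d0 "C")
    let d1 := d0.erase "C"                   -- del atoms['C']
    if d1.contains "H" then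
      let s := s ++ ("H" ++ hillCntA d1 "H")
      let d2 := d1.erase "H"                 -- del atoms['H']
      hillLoopA d2 s
    else
      hillLoopA d1 s
  else
    hillLoopA d0 ""

-- ===== PORT B =====
-- key(e) = (0,'') if e=='C' else (1,'') if e=='H' and has_C else (2,e), split into its two tuple components
def hillRank (hasC : Bool) (e : String) : Int :=
  if e = "C" then 0 else if e = "H" ∧ hasC = true then 1 else 2

def hillKey2 (hasC : Bool) (e : String) : String :=
  if e = "C" then "" else if e = "H" ∧ hasC = true then "" else e

def atoms_to_Hill_alt (atoms : List (String × Int)) : String :=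
  let d := PySem.Dict.ofList atoms
  let hasC := d.contains "C"
  PySem.Str.join ""
    ((PySem.List.sorted2 d.keys (hillRank hasC) (hillKey2 hasC)).map
      (fun e => e ++ (if d.getD e 0 = 1 then "" else PySem.Int.toStr (d.getD e 0))))

-- ===== PRECONDITION & SPEC =====
def Spec_atoms_to_Hill (atoms : List (String × Int)) (out : String) : Prop := out = atoms_to_Hill_alt atoms
instance (atoms : List (String × Int)) (out : String) : Decidable (Spec_atoms_to_Hill atoms out) := by unfold Spec_atoms_to_Hill; infer_instance

-- ===== CLAIM (what is proved, stated in full; the proofs are below) =====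
def Claim_equal_atoms_to_Hill : Prop := ∀ (atoms : List (String × Int)), Dom_atoms_to_Hill atoms → Spec_atoms_to_Hill atoms (atoms_to_Hill atoms)

-- ===== LEMMAS AND PROOFS =====

-- ''.join splits off its head
theorem join_empty_cons (x : String) (t : List String) :
    PySem.Str.join "" (x :: t) = x ++ PySem.Str.join "" t := by
  cases t with
  | nil => simp [PySem.Str.join, PySem.Chars.join, List.intercalate]
  | cons y u => simp [PySem.Str.join, PySem.Chars.join, List.intercalate, String.ofList_append]

-- A's string-accumulating loop is init ++ ''.join of the pieces
theorem foldl_append_join (L : List String) (f : String → String) (s : String) :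
    L.foldl (fun s e => s ++ f e) s = s ++ PySem.Str.join "" (L.map f) := by
  induction L generalizing s with
  | nil => simp [PySem.Str.join, PySem.Chars.join, List.intercalate]
  | cons x t ih => simp [List.foldl, ih, join_empty_cons, String.append_assoc]

theorem keys_erase (d : PySem.Dict String Int) (k : String) :
    (d.erase k).keys = d.keys.filter (fun x => x != k) := by
  simp only [PySem.Dict.erase, PySem.Dict.keys, List.filter_map]
  rfl

theorem getD_erase_of_ne (d : PySem.Dict String Int) {e k : String} (h : e ≠ k) (v : Int) :
    (d.erase k).getD e v = d.getD e v := by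
  obtain ⟨items⟩ := d
  simp only [PySem.Dict.getD, PySem.Dict.get?, PySem.Dict.erase]
  induction items with
  | nil => rfl
  | cons p t ih =>
    rw [List.filter_cons]
    by_cases hp : p.1 = e
    · have hb : (!p.1 == k) = true := by simp [hp, h]
      rw [hb, if_pos rfl, List.find?_cons_of_pos, List.find?_cons_of_pos] <;> simp [hp]
    · rw [List.find?_cons_of_neg (by simp [hp])]
      split
      · rw [List.find?_cons_of_neg (by simp [hp])]; exact ih
      · exact ih

theorem contains_erase_of_ne (d : PySem.Dict String Int) {e k : String} (h : e ≠ k) :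
    (d.erase k).contains e = d.contains e := by
  obtain ⟨items⟩ := d
  simp only [PySem.Dict.contains, PySem.Dict.erase]
  induction items with
  | nil => rfl
  | cons p t ih =>
    rw [List.filter_cons]
    by_cases hp : p.1 = e
    · have hb : (!p.1 == k) = true := by simp [hp, h]
      rw [hb, if_pos rfl]
      simp [hp]
    · split
      · simp only [List.any_cons, ih]
      · simp only [List.any_cons, ih]
        simp [hp]

-- sorted2 is sorted under the lexicographic pair key
theorem sorted2_eq_sorted_toLex (xs : List String) (k1 : String → Int) (k2 : String → String) :
    PySem.List.sorted2 xs k1 k2 = PySem.List.sorted xs (fun x => toLex (k1 x, k2 x)) := by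
  rw [PySem.List.sorted_eq_foldl_insertBy]
  unfold PySem.List.sorted2
  simp only [if_neg (by decide : ¬ (false = true))]
  congr 1
  funext acc a
  congr 1
  funext p q
  rcases lt_trichotomy (k1 p) (k1 q) with h | h | h
  · simp [Prod.Lex.toLex_lt_toLex, h, not_lt.mpr (le_of_lt h)]
  · simp [Prod.Lex.toLex_lt_toLex, h]
  · simp [Prod.Lex.toLex_lt_toLex, h, not_lt.mpr (le_of_lt h), ne_of_gt h]

-- sorted of a duplicate-free list is strictly increasing
theorem sorted_id_pairwise_lt (K : List String) (hnd : K.Nodup) :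
    (PySem.List.sorted K (fun x => x)).Pairwise (· < ·) := by
  have h1 := PySem.List.sorted_pairwise K (fun x => x)
  have h2 : (PySem.List.sorted K (fun x => x)).Nodup :=
    (PySem.List.sorted_perm K (fun x => x) false).symm.nodup hnd
  exact (h1.and h2).imp (fun h => lt_of_le_of_ne h.1 h.2)

-- when 'C' is absent B's keyed sort is the plain alphabetical sort
theorem order_noC (K : List String) (hnd : K.Nodup) (hC : "C" ∉ K) :
    PySem.List.sorted2 K (hillRank false) (hillKey2 false) = PySem.List.sorted K (fun x => x) := by
  rw [sorted2_eq_sorted_toLex]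
  apply PySem.List.sorted_eq_of_perm_of_pairwise_lt
  · exact PySem.List.sorted_perm K (fun x => x) false
  · apply (sorted_id_pairwise_lt K hnd).imp_of_mem
    intro a b ha hb hab
    have ha' : a ≠ "C" := fun h => hC (h ▸ ((PySem.List.mem_sorted _ _ _ _).mp ha))
    have hb' : b ≠ "C" := fun h => hC (h ▸ ((PySem.List.mem_sorted _ _ _ _).mp hb))
    simp [hillRank, hillKey2, ha', hb', Prod.Lex.toLex_lt_toLex, hab]

theorem mem_rst {K : List String} {b : String}
    (hb : b ∈ PySem.List.sorted ((K.filter (fun x => x != "C")).filter (fun x => x != "H")) (fun x => x)) :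
    b ∈ K ∧ b ≠ "C" ∧ b ≠ "H" := by
  have h := (PySem.List.mem_sorted _ _ _ _).mp hb
  simp only [List.mem_filter, bne_iff_ne, ne_eq] at h
  exact ⟨h.1.1, h.1.2, h.2⟩

theorem filter_H_of_not_mem {K : List String} (hH : "H" ∉ K) :
    (K.filter (fun x => x != "C")).filter (fun x => x != "H") = K.filter (fun x => x != "C") := by
  apply List.filter_eq_self.mpr
  intro b hb
  have hbK : b ∈ K := (List.mem_filter.mp hb).1
  simp only [bne_iff_ne, ne_eq]
  intro hbe; exact hH (hbe ▸ hbK)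

-- when 'C' is present B's keyed sort is C, then H if present, then the rest alphabetically
theorem order_C (K : List String) (hnd : K.Nodup) (hC : "C" ∈ K) :
    PySem.List.sorted2 K (hillRank true) (hillKey2 true) =
      "C" :: ((if "H" ∈ K then ["H"] else []) ++
        PySem.List.sorted ((K.filter (fun x => x != "C")).filter (fun x => x != "H")) (fun x => x)) := by
  have hF1 : K.erase "C" = K.filter (fun x => x != "C") := hnd.erase_eq_filter "C"
  have hndF1 : (K.filter (fun x => x != "C")).Nodup := hnd.filter _
  have hndF2 : ((K.filter (fun x => x != "C")).filter (fun x => x != "H")).Nodup := hndF1.filter _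
  rw [sorted2_eq_sorted_toLex]
  apply PySem.List.sorted_eq_of_perm_of_pairwise_lt
  · -- permutation
    by_cases hH : "H" ∈ K
    · have hHF1 : "H" ∈ (K.filter (fun x => x != "C")) := by simp [List.mem_filter, hH]
      have hF2 : (K.filter (fun x => x != "C")).erase "H" = (K.filter (fun x => x != "C")).filter (fun x => x != "H") :=
        hndF1.erase_eq_filter "H"
      rw [if_pos hH, ← hF2, ← hF1]
      rw [← hF1] at hHF1
      simp only [List.cons_append]
      refine (List.Perm.cons _ (List.Perm.cons _ (PySem.List.sorted_perm _ _ false))).trans ?_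
      exact ((List.perm_cons_erase hC).trans (List.Perm.cons _ (List.perm_cons_erase hHF1))).symm
    · rw [if_neg hH, filter_H_of_not_mem hH, ← hF1]
      simp only [List.nil_append]
      exact (List.Perm.cons _ (PySem.List.sorted_perm _ _ false)).trans (List.perm_cons_erase hC).symm
  · -- pairwise strictly increasing keys
    rw [List.pairwise_cons]
    constructor
    · intro b hb
      rcases List.mem_append.mp hb with h | h
      · have hbH : b = "H" := by
          rcases Decidable.em ("H" ∈ K) with hH | hH
          · rw [if_pos hH] at h; simpa using h
          · rw [if_neg hH] at h; simp at h
        subst hbH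
        simp [hillRank, hillKey2, Prod.Lex.toLex_lt_toLex]
      · obtain ⟨hbK, hbC, hbH⟩ := mem_rst h
        simp [hillRank, hillKey2, hbC, hbH, Prod.Lex.toLex_lt_toLex]
    · apply List.pairwise_append.mpr
      refine ⟨?_, ?_, ?_⟩
      · rcases Decidable.em ("H" ∈ K) with hH | hH
        · rw [if_pos hH]; simp
        · rw [if_neg hH]; simp
      · apply (sorted_id_pairwise_lt _ hndF2).imp_of_mem
        intro a b ha hb hab
        obtain ⟨_, haC, haH⟩ := mem_rst ha
        obtain ⟨_, hbC, hbH⟩ := mem_rst hb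
        simp [hillRank, hillKey2, haC, haH, hbC, hbH, Prod.Lex.toLex_lt_toLex, hab]
      · intro a ha b hb
        have haH : a = "H" := by
          rcases Decidable.em ("H" ∈ K) with hH | hH
          · rw [if_pos hH] at ha; simpa using ha
          · rw [if_neg hH] at ha; simp at ha
        subst haH
        obtain ⟨_, hbC, hbH⟩ := mem_rst hb
        simp [hillRank, hillKey2, hbC, hbH, Prod.Lex.toLex_lt_toLex]

theorem atoms_to_Hill_eq_alt (atoms : List (String × Int)) :
    atoms_to_Hill atoms = atoms_to_Hill_alt atoms := by
  unfold atoms_to_Hill atoms_to_Hill_alt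
  set d := PySem.Dict.ofList atoms with hd
  have hnd : d.keys.Nodup := PySem.Dict.nodup_keys_ofList atoms
  by_cases hCb : d.contains "C" = true
  · have hC : "C" ∈ d.keys := (PySem.Dict.contains_iff_mem_keys d "C").mp hCb
    simp only [hCb, if_true, order_C d.keys hnd hC]
    have hHC : ("H" : String) ≠ "C" := by decide
    rw [contains_erase_of_ne d hHC]
    by_cases hHb : d.contains "H" = true
    · have hH : "H" ∈ d.keys := (PySem.Dict.contains_iff_mem_keys d "H").mp hHb
      simp only [hHb, if_true, if_pos hH]
      rw [hillLoopA, foldl_append_join, keys_erase, keys_erase]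
      simp only [List.cons_append, List.map_cons, join_empty_cons]
      have hmap : (PySem.List.sorted ((d.keys.filter (fun x => x != "C")).filter (fun x => x != "H")) (fun x => x)).map
            (fun ele => ele ++ hillCntA ((d.erase "C").erase "H") ele)
          = (PySem.List.sorted ((d.keys.filter (fun x => x != "C")).filter (fun x => x != "H")) (fun x => x)).map
            (fun e => e ++ (if d.getD e 0 = 1 then "" else PySem.Int.toStr (d.getD e 0))) := by
        apply List.map_eq_map_iff.mpr
        intro a ha
        obtain ⟨_, haC, haH⟩ := mem_rst ha
        rw [hillCntA, getD_erase_of_ne _ haH, getD_erase_of_ne _ haC]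
      rw [hmap, hillCntA, hillCntA, getD_erase_of_ne d hHC]
      simp [String.append_assoc, String.empty_append]
    · have hH : "H" ∉ d.keys := fun h => hHb ((PySem.Dict.contains_iff_mem_keys d "H").mpr h)
      simp only [hHb, if_false, if_neg hH, Bool.false_eq_true]
      rw [hillLoopA, foldl_append_join, keys_erase, filter_H_of_not_mem hH]
      simp only [List.nil_append, List.map_cons, join_empty_cons]
      have hmap : (PySem.List.sorted (d.keys.filter (fun x => x != "C")) (fun x => x)).map
            (fun ele => ele ++ hillCntA (d.erase "C") ele)
          = (PySem.List.sorted (d.keys.filter (fun x => x != "C")) (fun x => x)).map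
            (fun e => e ++ (if d.getD e 0 = 1 then "" else PySem.Int.toStr (d.getD e 0))) := by
        apply List.map_eq_map_iff.mpr
        intro a ha
        have h' := (PySem.List.mem_sorted _ _ _ _).mp ha
        have haC : a ≠ "C" := by simpa using (List.mem_filter.mp h').2
        rw [hillCntA, getD_erase_of_ne _ haC]
      rw [hmap, hillCntA]
      simp [String.append_assoc, String.empty_append]
  · have hC : "C" ∉ d.keys := fun h => hCb ((PySem.Dict.contains_iff_mem_keys d "C").mpr h)
    simp only [hCb, if_false, Bool.false_eq_true]
    rw [order_noC d.keys hnd hC, hillLoopA, foldl_append_join, String.empty_append]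
    rfl

-- ===== VERDICT (by name: the statement is the Claim_ definition above) =====
theorem atoms_to_Hill_spec : Claim_equal_atoms_to_Hill := by
  intro atoms _
  unfold Spec_atoms_to_Hill
  exact atoms_to_Hill_eq_alt atoms
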